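-- pv_equiv track=rewrite | github.com/Jungdomo/PCT | 1/155652/문정민.py | solution
-- ===== SOURCE A (Python) =====
-- def solution(s, skip, index):
--     a = list(s)
--     b = list(skip)
--
--     result = []
--
--     for i in a:
--         rst = i
--         for j in range(index):
--             if ord(rst) + 1 == 123:
--                 rst = 'a'
--             else:
--                 rst = chr(ord(rst) + 1)
--
--             for v in b:
--                 if rst in b:
--                     if ord(rst) + 1 == 123:
--                         rst = 'a'
--                     else:
--                         rst = chr(ord(rst) + 1)
--
--             if j + 1 == index:
--                 result.append(rst)
--
--     cnt = ''.join(result)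
--     return cnt
-- ===== SOURCE B (Python) =====
-- def solution(s, skip, index):
--     if index < 1:
--         return ''  # no round is ever completed, so nothing is emitted
--
--     skipset = set(skip)
--     k = len(skip)
--
--     def nxt(c):
--         return 'a' if ord(c) == 122 else chr(ord(c) + 1)
--
--     def rnd(c):
--         # one round: advance once, then move past skip letters (at most k extra steps)
--         c = nxt(c)
--         i = 0
--         while i < k and c in skipset:
--             c = nxt(c)
--             i += 1
--         return c
--
--     n = index
--
--     def advance(c):
--         # apply rnd n times, short-circuiting via cycle detection
--         seen = {}
--         states = []
--         t = 0
--         cur = c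
--         while t < n:
--             if cur in seen:
--                 start = seen[cur]
--                 p = t - start
--                 return states[start + (n - start) % p]
--             seen[cur] = t
--             states.append(cur)
--             cur = rnd(cur)
--             t += 1
--         return cur
--
--     cache = {}
--     out = []
--     for ch in s:
--         if ch not in cache:
--             cache[ch] = advance(ch)
--         out.append(cache[ch])
--     return ''.join(out)
-- ===== Notes on version B (the rewrite author's own statement) =====
-- stated objective: faster
-- what changed: B replaces A's per-character loop of `index` rounds (each rescanning the skip string with nested membership tests) by one round function plus cycle detection with memoization per distinct character, so the answer for huge `index` is read off the detected cycle after O(alphabet) rounds.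
-- outside the precondition, e.g. on solution('{', 'ab', 600000): A returns '\U0009283b', B returns '\U0009283b'
import Mathlib
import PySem

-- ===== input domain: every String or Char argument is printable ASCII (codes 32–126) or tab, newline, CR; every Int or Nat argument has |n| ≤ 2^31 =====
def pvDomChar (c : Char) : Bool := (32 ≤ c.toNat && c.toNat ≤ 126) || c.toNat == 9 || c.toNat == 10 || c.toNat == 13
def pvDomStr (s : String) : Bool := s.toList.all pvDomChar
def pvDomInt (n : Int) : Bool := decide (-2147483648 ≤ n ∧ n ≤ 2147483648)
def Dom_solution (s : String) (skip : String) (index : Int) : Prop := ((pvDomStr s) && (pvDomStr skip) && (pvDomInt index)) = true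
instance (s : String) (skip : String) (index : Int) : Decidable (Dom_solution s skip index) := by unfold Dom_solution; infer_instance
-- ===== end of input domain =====

-- B replaces A's per-character loop of `index` rounds by cycle detection with memoization (faster on large `index`).

-- ===== PORT A =====
-- chr(ord(rst) + 1), with A's wrap test `ord(rst) + 1 == 123` → 'a'
def pvNextA (c : Char) : Char := if c.toNat + 1 = 123 then 'a' else Char.ofNat (c.toNat + 1)

def solution (s : String) (skip : String) (index : Int) : String :=
  let a := s.toList
  let b := skip.toList
  let result : List Char :=
    a.foldl (fun result i =>
      ((PySem.List.pyRange 0 index 1).foldl (fun (st : List Char × Char) j =>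
          let rst := pvNextA st.2
          let rst := b.foldl (fun rst _v => if b.contains rst then pvNextA rst else rst) rst
          if j + 1 = index then (st.1 ++ [rst], rst) else (st.1, rst))
        (result, i)).1) []
  String.ofList result

-- ===== PORT B =====
-- 'a' if ord(c) == 122 else chr(ord(c) + 1)
def pvNextB (c : Char) : Char := if c.toNat = 122 then 'a' else Char.ofNat (c.toNat + 1)

-- `while i < k and c in skipset: c = nxt(c); i += 1`
def pvSkipWhile (skipset : PySem.Set Char) (fuel : Nat) (c : Char) : Char :=
  match fuel with
  | 0 => c
  | f + 1 => if PySem.Set.contains skipset c then pvSkipWhile skipset f (pvNextB c) else c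

-- rnd: one round = advance once, then skip past skip-letters (at most k times)
def pvRound (skipset : PySem.Set Char) (k : Nat) (c : Char) : Char :=
  pvSkipWhile skipset k (pvNextB c)

-- advance: apply g (= rnd) n times with cycle detection (`while t < n` ported with fuel n - t)
def pvAdvance (g : Char → Char) (n : Nat) (seen : PySem.Dict Char Nat)
    (states : List Char) (t : Nat) (cur : Char) (fuel : Nat) : Char :=
  match fuel with
  | 0 => cur
  | f + 1 =>
    match seen.get? cur with
    | some start => states.getD (start + (n - start) % (t - start)) cur
    | none => pvAdvance g n (seen.insert cur t) (states ++ [cur]) (t + 1) (g cur) f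

def solution_alt (s : String) (skip : String) (index : Int) : String :=
  if index < 1 then "" else
  let skipset := PySem.Set.ofList skip.toList
  let k := skip.toList.length
  let n : Nat := index.toNat
  let out : List Char :=
    (s.toList.foldl (fun (st : List Char × PySem.Dict Char Char) ch =>
        match st.2.get? ch with
        | some v => (st.1 ++ [v], st.2)
        | none =>
          let v := pvAdvance (pvRound skipset k) n PySem.Dict.empty [] 0 ch n
          (st.1 ++ [v], st.2.insert ch v)) ([], PySem.Dict.empty)).1
  String.ofList out

-- ===== PRECONDITION & SPEC =====
-- Pre_ excludes inputs with a character above 'z' together with 1 ≤ index so large that the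
-- character's climbing trajectory of at most index*(1+len(skip)) increments is not kept below
-- code point 55296: past 1114111 Python's chr raises ValueError, and the surrogate range that
-- Python's chr accepts is not representable as a Lean Char, so nothing is claimed there (a
-- stated narrowing: A still returns on part of this region, and B returns the same value there).
def Pre_solution (s : String) (skip : String) (index : Int) : Prop :=
  index < 1 ∨ (s.toList.all (fun c => decide (c.toNat ≤ 122) ||
    decide ((c.toNat : Int) + index * (1 + (skip.toList.length : Int)) < 55296))) = true
instance (s : String) (skip : String) (index : Int) : Decidable (Pre_solution s skip index) := by unfold Pre_solution; infer_instance

def pvWitness_solution : String × String × Int := ("abz {", "b", 2)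

def Spec_solution (s : String) (skip : String) (index : Int) (out : String) : Prop := out = solution_alt s skip index
instance (s : String) (skip : String) (index : Int) (out : String) : Decidable (Spec_solution s skip index out) := by unfold Spec_solution; infer_instance

-- ===== CLAIM (what is proved, stated in full; the proofs are below) =====
def Claim_equal_solution : Prop := ∀ (s : String) (skip : String) (index : Int), Dom_solution s skip index → Pre_solution s skip index → Spec_solution s skip index (solution s skip index)

-- ===== LEMMAS AND PROOFS =====

theorem pvNextB_eq_pvNextA (c : Char) : pvNextB c = pvNextA c := by
  unfold pvNextA pvNextB
  by_cases h : c.toNat = 122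
  · simp [h]
  · rw [if_neg h, if_neg (by omega)]

-- A's one round as a function of the incoming character
def pvRoundA (b : List Char) (c : Char) : Char :=
  b.foldl (fun rst _v => if b.contains rst then pvNextA rst else rst) (pvNextA c)

theorem foldl_skip_of_not_contains (b l : List Char) (r : Char) (h : b.contains r = false) :
    l.foldl (fun rst _v => if b.contains rst then pvNextA rst else rst) r = r := by
  induction l with
  | nil => rfl
  | cons a l ih =>
    rw [List.foldl_cons, if_neg (by rw [h]; exact Bool.false_ne_true)]
    exact ih

theorem foldl_eq_skipWhile (b : List Char) (l : List Char) (r : Char) :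
    l.foldl (fun rst _v => if b.contains rst then pvNextA rst else rst) r
      = pvSkipWhile (PySem.Set.ofList b) l.length r := by
  induction l generalizing r with
  | nil => rfl
  | cons a l ih =>
    have hmem : PySem.Set.contains (PySem.Set.ofList b) r = b.contains r := by
      simp [PySem.Set.contains, PySem.Set.mem_ofList]
    by_cases h : b.contains r = true
    · simp only [List.foldl_cons, pvSkipWhile, List.length_cons, hmem, h, if_true,
        pvNextB_eq_pvNextA]
      exact ih (pvNextA r)
    · rw [Bool.not_eq_true] at h
      simp only [List.foldl_cons, pvSkipWhile, List.length_cons, hmem, h, if_false,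
        Bool.false_eq_true]
      exact foldl_skip_of_not_contains b l r h

theorem pvRound_eq_pvRoundA (b : List Char) (c : Char) :
    pvRound (PySem.Set.ofList b) b.length c = pvRoundA b c := by
  unfold pvRound pvRoundA
  rw [foldl_eq_skipWhile, pvNextB_eq_pvNextA]

-- A's inner loop over range(index) computes pvRoundA^[n] and appends it exactly once
theorem inner_foldl_eq (b : List Char) (n : Nat) (hn : 1 ≤ n) (m : Nat) (hm : m ≤ n)
    (res : List Char) (c : Char) :
    ((List.range m).map Int.ofNat).foldl (fun (st : List Char × Char) j =>
        let rst := pvNextA st.2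
        let rst := b.foldl (fun rst _v => if b.contains rst then pvNextA rst else rst) rst
        if j + 1 = (n : Int) then (st.1 ++ [rst], rst) else (st.1, rst)) (res, c)
      = (if m = n then res ++ [(pvRoundA b)^[n] c] else res, (pvRoundA b)^[m] c) := by
  induction m with
  | zero =>
    rw [if_neg (by omega)]
    rfl
  | succ m ih =>
    rw [List.range_succ, List.map_append, List.foldl_append,
      ih (by omega)]
    rw [if_neg (by omega)]
    simp only [List.map_cons, List.map_nil, List.foldl_cons, List.foldl_nil]
    by_cases h : m + 1 = n
    · subst h
      rw [if_pos (by simp only [Int.ofNat_eq_natCast]; omega), if_pos rfl,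
        Function.iterate_succ_apply']
      rfl
    · rw [if_neg (by simp only [Int.ofNat_eq_natCast]; omega), if_neg h,
        Function.iterate_succ_apply']
      rfl

-- periodicity: once a state repeats, iterates reduce modulo the period
theorem iterate_period (g : Char → Char) (c : Char) (s p : Nat) (hp : 0 < p)
    (h : g^[s + p] c = g^[s] c) :
    ∀ m, s ≤ m → g^[m] c = g^[s + (m - s) % p] c := by
  intro m
  induction m using Nat.strong_induction_on with
  | _ m ih =>
    intro hsm
    by_cases hlt : m < s + p
    · rw [Nat.mod_eq_of_lt (by omega), Nat.add_sub_cancel' hsm]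
    · rw [Nat.not_lt] at hlt
      have h1 : g^[m] c = g^[m - p] c := by
        have e : m = (m - (s + p)) + (s + p) := by omega
        calc g^[m] c = g^[m - (s + p)] (g^[s + p] c) := by
              rw [← Function.iterate_add_apply, ← e]
          _ = g^[m - (s + p)] (g^[s] c) := by rw [h]
          _ = g^[m - (s + p) + s] c := by rw [← Function.iterate_add_apply]
          _ = g^[m - p] c := by congr 1; omega
      have h2 : (m - s) % p = (m - p - s) % p := by
        have : m - s = (m - p - s) + p := by omega
        rw [this, Nat.add_mod_right]
      rw [h1, h2]
      exact ih (m - p) (by omega) (by omega)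

-- cycle-detection loop correctness
theorem pvAdvance_correct (g : Char → Char) (c : Char) (n : Nat) :
    ∀ (fuel t : Nat) (seen : PySem.Dict Char Nat) (states : List Char) (cur : Char),
      t + fuel = n →
      cur = g^[t] c →
      states = (List.range t).map (fun i => g^[i] c) →
      (∀ x i, seen.get? x = some i → i < t ∧ g^[i] c = x) →
      pvAdvance g n seen states t cur fuel = g^[n] c := by
  intro fuel
  induction fuel with
  | zero =>
    intro t seen states cur hfuel hcur _ _
    have : t = n := by omega
    simp [pvAdvance, hcur, this]
  | succ f ih =>
    intro t seen states cur hfuel hcur hstates hseen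
    cases hget : seen.get? cur with
    | some start =>
      simp only [pvAdvance, hget]
      obtain ⟨hst, heq⟩ := hseen cur start hget
      have hp : 0 < t - start := by omega
      have hper : g^[start + (t - start)] c = g^[start] c := by
        rw [Nat.add_sub_cancel' (by omega), heq, hcur]
      have hidx : start + (n - start) % (t - start) < t :=
        lt_of_lt_of_le (by have := Nat.mod_lt (n - start) hp; omega) (le_refl t)
      rw [hstates, List.getD_eq_getElem _ _ (by simpa using hidx)]
      simp only [List.getElem_map, List.getElem_range]
      exact (iterate_period g c start (t - start) hp hper n (by omega)).symm
    | none =>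
      simp only [pvAdvance, hget]
      refine ih (t + 1) (seen.insert cur t) (states ++ [cur]) (g cur) (by omega) ?_ ?_ ?_
      · rw [hcur, ← Function.iterate_succ_apply' g t c]
      · rw [hstates, List.range_succ, List.map_append, List.map_cons, List.map_nil, hcur]
      · intro x i hx
        rw [PySem.Dict.get?_insert] at hx
        by_cases hxc : x = cur
        · rw [if_pos hxc] at hx
          obtain rfl : t = i := Option.some_inj.mp hx
          exact ⟨by omega, by rw [hxc]; exact hcur.symm⟩
        · rw [if_neg hxc] at hx
          obtain ⟨h1, h2⟩ := hseen x i hx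
          exact ⟨by omega, h2⟩

-- the memoizing fold computes the map of its function
theorem memo_foldl_eq (F : Char → Char) :
    ∀ (l : List Char) (out : List Char) (cache : PySem.Dict Char Char),
      (∀ x v, cache.get? x = some v → v = F x) →
      (l.foldl (fun (st : List Char × PySem.Dict Char Char) ch =>
          match st.2.get? ch with
          | some v => (st.1 ++ [v], st.2)
          | none => (st.1 ++ [F ch], st.2.insert ch (F ch))) (out, cache)).1
        = out ++ l.map F := by
  intro l
  induction l with
  | nil => intro out cache _; simp
  | cons ch l ih =>
    intro out cache hcache
    simp only [List.foldl_cons, List.map_cons]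
    cases hget : cache.get? ch with
    | some v =>
      rw [hcache ch v hget]
      rw [ih (out ++ [F ch]) cache hcache, List.append_assoc]
      rfl
    | none =>
      rw [ih (out ++ [F ch]) (cache.insert ch (F ch)) ?_, List.append_assoc]
      · rfl
      · intro x v hx
        rw [PySem.Dict.get?_insert] at hx
        by_cases hxc : x = ch
        · rw [if_pos hxc] at hx
          rw [hxc, ← Option.some_inj.mp hx]
        · rw [if_neg hxc] at hx
          exact hcache x v hx

-- ===== VERDICT (by name: the statement is the Claim_ definition above) =====
theorem solution_spec : Claim_equal_solution := by
  intro s skip index _hdom _hpre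
  unfold Spec_solution solution solution_alt
  by_cases hlt : index < 1
  · rw [if_pos hlt]
    dsimp only
    rw [PySem.List.pyRange_one_eq_nil (by omega)]
    simp
  rw [if_neg hlt]
  have hidx : 1 ≤ index := by omega
  dsimp only
  set b := skip.toList with hb
  set n : Nat := index.toNat with hn
  have hn1 : 1 ≤ n := by omega
  have hcast : (n : Int) = index := Int.toNat_of_nonneg (by omega)
  -- A's side: map of pvRoundA^[n]
  have hrange : PySem.List.pyRange 0 index 1 = (List.range n).map Int.ofNat := by
    rw [← hcast, PySem.List.pyRange_zero_natCast]
    rfl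
  have hA : ∀ (l : List Char) (res : List Char),
      l.foldl (fun result i =>
        (((List.range n).map Int.ofNat).foldl (fun (st : List Char × Char) j =>
            let rst := pvNextA st.2
            let rst := b.foldl (fun rst _v => if b.contains rst then pvNextA rst else rst) rst
            if j + 1 = index then (st.1 ++ [rst], rst) else (st.1, rst))
          (result, i)).1) res
      = res ++ l.map (fun c => (pvRoundA b)^[n] c) := by
    intro l
    induction l with
    | nil => intro res; simp
    | cons c l ih =>
      intro res
      have h1 := inner_foldl_eq b n hn1 n (le_refl n) res c
      rw [hcast] at h1
      rw [List.foldl_cons, h1, if_pos rfl, List.map_cons, ih, List.append_assoc]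
      rfl
  rw [hrange, hA]
  -- B's side: map of the memoized advance
  have hB := memo_foldl_eq
    (fun ch => pvAdvance (pvRound (PySem.Set.ofList b) b.length) n PySem.Dict.empty [] 0 ch n)
    s.toList [] PySem.Dict.empty (by intro x v hx; simp [PySem.Dict.get?_empty] at hx)
  dsimp only at hB
  rw [hB]
  -- the two per-character functions agree
  have hFn : ∀ c : Char,
      pvAdvance (pvRound (PySem.Set.ofList b) b.length) n PySem.Dict.empty [] 0 c n
        = (pvRoundA b)^[n] c := by
    intro c
    have hg : pvRound (PySem.Set.ofList b) b.length = pvRoundA b :=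
      funext (pvRound_eq_pvRoundA b)
    rw [hg]
    exact pvAdvance_correct (pvRoundA b) c n n 0 PySem.Dict.empty [] c (by omega) rfl (by simp)
      (by intro x i hx; simp [PySem.Dict.get?_empty] at hx)
  simp only [hFn, List.nil_append]
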